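-- pv_equiv track=rewrite | github.com/raphey/binary-matrices | matrix_generator.py | tie_break_permutations
-- ===== SOURCE A (Python) =====
-- def permutations(seq):
--     perms = []
--     for i in range(0, len(seq)):
--         leftover = seq[:i] + seq[i + 1:]
--         if len(leftover) == 0:
--             perms.append([seq[i]])
--         for perm in permutations(leftover):
--             perms.append([seq[i]] + perm)
--     return perms
--
-- def tie_break_permutations(ties_list, n):
--     perms = [[x for x in range(0, n)]]
--     perm_count = 1
--
--     for tie in ties_list:
--         initial_index = tie[0]
--         tie_length = len(tie)
--         tie_perms = permutations(tie)
--         tie_perms_length = len(tie_perms)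
--         for i in range(1, tie_perms_length):
--             for j in range(0, perm_count):
--                 new_perm = perms[j][:]
--                 for t in range(0, tie_length):
--                     new_perm[initial_index + t] = tie_perms[i][t]
--                 perms.append(new_perm)
--         perm_count = len(perms)
--
--     return perms
-- ===== SOURCE B (Python) =====
-- def _perms(seq):
--     if not seq:
--         return [[]]
--     return [[seq[i]] + rest
--             for i in range(len(seq))
--             for rest in _perms(seq[:i] + seq[i + 1:])]
--
--
-- def tie_break_permutations(ties_list, n):
--     options = [(tie[0], _perms(tie)) for tie in ties_list]
--     combos = [[]]
--     for _, ps in reversed(options):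
--         combos = [c + [i] for c in combos for i in range(len(ps))]
--     result = []
--     for combo in combos:
--         row = list(range(n))
--         for (idx, ps), ci in zip(options, reversed(combo)):
--             if ci:
--                 chosen = ps[ci]
--                 for t, v in enumerate(chosen):
--                     row[idx + t] = v
--         result.append(row)
--     return result
-- ===== Notes on version B (the rewrite author's own statement) =====
-- stated objective: alternative
-- what changed: B precomputes each tie's permutation list once, enumerates all choice combinations as an explicit reversed cartesian product, and rebuilds every output row from a fresh base row, instead of A's incremental growth of the perms list by copying earlier rows and overwriting the tie's slots in place.
import Mathlib
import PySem

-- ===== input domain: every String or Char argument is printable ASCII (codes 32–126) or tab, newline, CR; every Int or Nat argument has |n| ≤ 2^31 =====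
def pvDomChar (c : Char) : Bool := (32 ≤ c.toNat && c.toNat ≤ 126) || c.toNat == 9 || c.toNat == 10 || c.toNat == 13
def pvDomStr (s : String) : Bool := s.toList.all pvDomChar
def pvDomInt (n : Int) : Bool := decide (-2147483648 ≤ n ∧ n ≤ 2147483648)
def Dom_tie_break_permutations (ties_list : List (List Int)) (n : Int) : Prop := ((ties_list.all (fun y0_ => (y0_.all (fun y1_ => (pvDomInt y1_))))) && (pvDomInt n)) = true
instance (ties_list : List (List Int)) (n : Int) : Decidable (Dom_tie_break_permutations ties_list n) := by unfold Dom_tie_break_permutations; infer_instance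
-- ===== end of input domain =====

-- B re-derives each output row from a fresh base row via an explicit cartesian product of
-- per-tie permutation choices instead of A's incremental copy-and-overwrite growth of the
-- perms list (objective: alternative decomposition; same asymptotic cost).

-- Shared primitive: Python list item assignment 'row[i] = v' (negative index wraps;
-- out-of-range raises IndexError in Python — those inputs are excluded by Pre_, no-op here).
def pySetItem (xs : List Int) (i : Int) (v : Int) : List Int :=
  let j : Int := if i < 0 then i + xs.length else i
  if 0 ≤ j ∧ j < (xs.length : Int) then xs.set j.toNat v else xs

-- ===== PORT A =====
-- A's recursive helper 'permutations': builds perms by appending, with a special case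
-- when the leftover is empty.  (The fuel argument only makes the recursion structural;
-- fuel = seq.length always suffices, since each leftover is one element shorter.)
def permsA_fuel : Nat → List Int → List (List Int)
  | 0, _ => []
  | fuel + 1, seq =>
    (List.range seq.length).foldl (fun acc i =>
      let leftover := seq.take i ++ seq.drop (i + 1)
      let acc2 := if leftover.length = 0 then acc ++ [[seq.getD i 0]] else acc
      acc2 ++ (permsA_fuel fuel leftover).map (fun p => seq.getD i 0 :: p)) []

def permsA (seq : List Int) : List (List Int) := permsA_fuel seq.length seq

def tie_break_permutations (ties_list : List (List Int)) (n : Int) : List (List Int) :=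
  (ties_list.foldl (fun (st : List (List Int) × Nat) tie =>
    let initial_index := tie.getD 0 0          -- tie[0] (raises on empty tie: outside Pre_)
    let tie_length := tie.length
    let tie_perms := permsA tie
    let perms2 := (List.range' 1 (tie_perms.length - 1)).foldl (fun ps i =>
      (List.range st.2).foldl (fun ps2 j =>
        let new_perm := (List.range tie_length).foldl
          (fun row t => pySetItem row (initial_index + Int.ofNat t) ((tie_perms.getD i []).getD t 0))
          (ps2.getD j [])
        ps2 ++ [new_perm]) ps) st.1
    (perms2, perms2.length)) ([PySem.List.pyRange 0 n 1], 1)).1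

-- ===== PORT B =====
-- B's '_perms': itertools-style, [[]] for the empty sequence, a flat comprehension otherwise.
-- (Same structural-fuel device; fuel = seq.length always suffices.)
def permsB_fuel : Nat → List Int → List (List Int)
  | 0, _ => [[]]
  | fuel + 1, seq =>
    if seq = [] then [[]]
    else (List.range seq.length).flatMap (fun i =>
      (permsB_fuel fuel (seq.take i ++ seq.drop (i + 1))).map (fun rest => seq.getD i 0 :: rest))

def permsB (seq : List Int) : List (List Int) := permsB_fuel seq.length seq

def tie_break_permutations_alt (ties_list : List (List Int)) (n : Int) : List (List Int) :=
  let options := ties_list.map (fun tie => (tie.getD 0 0, permsB tie))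
  let combos := options.reverse.foldl
    (fun cs o => cs.flatMap (fun c => (List.range o.2.length).map (fun i => c ++ [i]))) [[]]
  combos.map (fun combo =>
    (options.zip combo.reverse).foldl (fun row oc =>
      if oc.2 = 0 then row
      else (PySem.List.enumerate (oc.1.2.getD oc.2 [])).foldl
        (fun r tv => pySetItem r (oc.1.1 + tv.1) tv.2) row)
      (PySem.List.pyRange 0 n 1))

-- ===== PRECONDITION & SPEC =====
-- Pre_ excludes exactly the inputs where Python A raises: an empty tie (tie[0] → IndexError)
-- and, for ties of length ≥ 2 (the only ones whose permutations are written), a tie whose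
-- write positions tie[0]+t fall outside Python's accepted index range [-n, n) (IndexError).
def Pre_tie_break_permutations (ties_list : List (List Int)) (n : Int) : Prop :=
  ∀ tie ∈ ties_list, tie ≠ [] ∧
    (2 ≤ tie.length → ∀ t ∈ List.range tie.length,
      -n ≤ tie.getD 0 0 + (t : Int) ∧ tie.getD 0 0 + (t : Int) < n)
instance (ties_list : List (List Int)) (n : Int) : Decidable (Pre_tie_break_permutations ties_list n) := by unfold Pre_tie_break_permutations; infer_instance

def pvWitness_tie_break_permutations : List (List Int) × Int := ([[0, 1], [2]], 3)

def Spec_tie_break_permutations (ties_list : List (List Int)) (n : Int) (out : List (List Int)) : Prop := out = tie_break_permutations_alt ties_list n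
instance (ties_list : List (List Int)) (n : Int) (out : List (List Int)) : Decidable (Spec_tie_break_permutations ties_list n out) := by unfold Spec_tie_break_permutations; infer_instance

-- ===== CLAIM (what is proved, stated in full; the proofs are below) =====
def Claim_equal_tie_break_permutations : Prop := ∀ (ties_list : List (List Int)) (n : Int), Dom_tie_break_permutations ties_list n → Pre_tie_break_permutations ties_list n → Spec_tie_break_permutations ties_list n (tie_break_permutations ties_list n)

-- ===== LEMMAS AND PROOFS =====

-- A's per-tie loop body, named for the proofs (identical to the lambda in the port).
def stepA (st : List (List Int) × Nat) (tie : List Int) : List (List Int) × Nat :=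
  let initial_index := tie.getD 0 0
  let tie_length := tie.length
  let tie_perms := permsA tie
  let perms2 := (List.range' 1 (tie_perms.length - 1)).foldl (fun ps i =>
    (List.range st.2).foldl (fun ps2 j =>
      let new_perm := (List.range tie_length).foldl
        (fun row t => pySetItem row (initial_index + Int.ofNat t) ((tie_perms.getD i []).getD t 0))
        (ps2.getD j [])
      ps2 ++ [new_perm]) ps) st.1
  (perms2, perms2.length)

lemma portA_eq (ties : List (List Int)) (n : Int) :
    tie_break_permutations ties n
      = (ties.foldl stepA ([PySem.List.pyRange 0 n 1], [PySem.List.pyRange 0 n 1].length)).1 := rfl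

-- the semantic effect of choosing permutation i for a tie (i = 0: leave the row unchanged)
def appC (tie : List Int) (i : Nat) (row : List Int) : List Int :=
  if i = 0 then row
  else (List.range tie.length).foldl
    (fun r t => pySetItem r (tie.getD 0 0 + Int.ofNat t) (((permsA tie).getD i []).getD t 0)) row

def appCombo (ties : List (List Int)) (c : List Nat) (row : List Int) : List Int :=
  (ties.zip c).foldl (fun r p => appC p.1 p.2 r) row

-- all index combinations over per-tie counts, later ties most significant, first tie fastest
def combosLr : List Nat → List (List Nat)
  | [] => [[]]
  | r :: rs => (combosLr rs).flatMap (fun c => (List.range r).map (fun i => i :: c))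

-- itertools.product order: first list most significant
def prodR : List Nat → List (List Nat)
  | [] => [[]]
  | r :: rs => (List.range r).flatMap (fun i => (prodR rs).map (fun d => i :: d))

lemma flatMap_congr' {α β : Type} {l : List α} {f g : α → List β}
    (h : ∀ x ∈ l, f x = g x) : l.flatMap f = l.flatMap g := by
  induction l with
  | nil => rfl
  | cons a l ih =>
    simp only [List.flatMap_cons]
    rw [h a (by simp), ih (fun x hx => h x (by simp [hx]))]

lemma flatMap_single {α β : Type} (l : List α) (f : α → β) :
    l.flatMap (fun x => [f x]) = l.map f := by
  induction l with
  | nil => rfl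
  | cons a l ih => simp only [List.flatMap_cons, List.map_cons, ih]; rfl

lemma appCombo_cons (tie : List Int) (ts : List (List Int)) (i : Nat) (c : List Nat)
    (p : List Int) : appCombo (tie :: ts) (i :: c) p = appCombo ts c (appC tie i p) := rfl

-- permutations facts
lemma permsA_eq_permsB_fuel : ∀ (fuel : Nat) (seq : List Int), seq.length = fuel → seq ≠ [] →
    permsA_fuel fuel seq = permsB_fuel fuel seq := by
  intro fuel
  induction fuel with
  | zero => intro seq hlen hne; exact absurd (List.length_eq_zero_iff.mp hlen) hne
  | succ fuel ih =>
    intro seq hlen hne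
    rw [permsA_fuel, permsB_fuel, if_neg hne]
    rw [PySem.List.foldl_congr_mem _ _
      (fun acc i =>
        acc ++ (permsB_fuel fuel (seq.take i ++ seq.drop (i + 1))).map
          (fun rest => seq.getD i 0 :: rest)) _ ?_]
    · rw [PySem.List.foldl_append_eq_flatMap]; rfl
    · intro acc i hi'
      dsimp only
      have hi : i < seq.length := List.mem_range.mp hi'
      have hlo : (seq.take i ++ seq.drop (i + 1)).length = fuel := by
        simp only [List.length_append, List.length_take, List.length_drop]; omega
      by_cases hz : (seq.take i ++ seq.drop (i + 1)).length = 0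
      · have hempty : seq.take i ++ seq.drop (i + 1) = [] := List.length_eq_zero_iff.mp hz
        have hf0 : fuel = 0 := by omega
        rw [if_pos hz, hempty, hf0]
        cases fuel' : (0 : Nat) <;> simp [permsA_fuel, permsB_fuel]
      · have hlone : seq.take i ++ seq.drop (i + 1) ≠ [] := by
          intro h; exact hz (by rw [h]; rfl)
        rw [if_neg hz, ih _ hlo hlone]

lemma permsA_eq_permsB (seq : List Int) (hne : seq ≠ []) : permsA seq = permsB seq :=
  permsA_eq_permsB_fuel seq.length seq rfl hne

lemma permsB_ne_nil_fuel : ∀ (fuel : Nat) (seq : List Int), seq.length = fuel →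
    permsB_fuel fuel seq ≠ [] := by
  intro fuel
  induction fuel with
  | zero => intro seq _; rw [permsB_fuel]; simp
  | succ fuel ih =>
    intro seq hlen
    rw [permsB_fuel]
    split
    · simp
    · next hne =>
      intro h
      have hpos : 0 < seq.length := List.length_pos_iff.mpr hne
      have h0 : 0 ∈ List.range seq.length := List.mem_range.mpr hpos
      have := (List.flatMap_eq_nil_iff.mp h) _ h0
      have hmapnil := List.map_eq_nil_iff.mp this
      have hlo : (seq.take 0 ++ seq.drop (0 + 1)).length = fuel := by
        simp only [List.length_append, List.length_take, List.length_drop]; omega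
      exact ih _ hlo hmapnil

lemma permsB_ne_nil (seq : List Int) : permsB seq ≠ [] :=
  permsB_ne_nil_fuel seq.length seq rfl

lemma permsB_len_mem_fuel : ∀ (fuel : Nat) (seq : List Int), seq.length = fuel →
    ∀ p ∈ permsB_fuel fuel seq, p.length = seq.length := by
  intro fuel
  induction fuel with
  | zero =>
    intro seq hlen p hp
    rw [permsB_fuel] at hp
    simp only [List.mem_singleton] at hp
    simp [hp, List.length_eq_zero_iff.mp hlen]
  | succ fuel ih =>
    intro seq hlen p hp
    rw [permsB_fuel] at hp
    split at hp
    · next he => simp only [List.mem_singleton] at hp; simp [hp, he]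
    · next hne =>
      simp only [List.mem_flatMap, List.mem_map] at hp
      obtain ⟨i, hi', rest, hrest, hpeq⟩ := hp
      have hi : i < seq.length := List.mem_range.mp hi'
      have hlo : (seq.take i ++ seq.drop (i + 1)).length = fuel := by
        simp only [List.length_append, List.length_take, List.length_drop]; omega
      have hrlen := ih _ hlo rest hrest
      subst hpeq
      simp only [List.length_cons, hrlen, List.length_append, List.length_take,
        List.length_drop] at *
      omega

lemma permsB_len_mem (seq : List Int) : ∀ p ∈ permsB seq, p.length = seq.length :=
  permsB_len_mem_fuel seq.length seq rfl

lemma permsA_ne_nil (seq : List Int) (hne : seq ≠ []) : permsA seq ≠ [] := by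
  rw [permsA_eq_permsB seq hne]; exact permsB_ne_nil seq

lemma permsA_len_mem (seq : List Int) (hne : seq ≠ []) :
    ∀ p ∈ permsA seq, p.length = seq.length := by
  rw [permsA_eq_permsB seq hne]; exact permsB_len_mem seq

-- A's j-loop: appending f(perms[j]) for j < k only reads the stable prefix
lemma jloop (g : List Int → List Int) :
    ∀ (k : Nat) (L : List (List Int)), k ≤ L.length →
    (List.range k).foldl (fun acc j => acc ++ [g (acc.getD j [])]) L
      = L ++ (L.take k).map g := by
  intro k
  induction k with
  | zero => simp
  | succ k ih =>
    intro L hk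
    have hk' : k < L.length := by omega
    rw [List.range_succ, List.foldl_append, ih L (by omega)]
    simp only [List.foldl_cons, List.foldl_nil]
    have h1 : (L ++ (L.take k).map g).getD k [] = L.getD k [] := by
      rw [List.getD_eq_getElem?_getD, List.getElem?_append_left hk',
        ← List.getD_eq_getElem?_getD]
    have h2 : L.take (k + 1) = L.take k ++ [L.getD k []] := by
      rw [List.take_add_one, List.getElem?_eq_getElem hk', List.getD_eq_getElem _ _ hk']
      rfl
    rw [h1, h2]
    simp

-- A's i-loop over the j-loop: each pass appends a transformed copy of the original block P
lemma iloop (P : List (List Int)) (G : Nat → List Int → List Int) :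
    ∀ (is : List Nat) (X : List (List Int)),
    is.foldl (fun ps i => (List.range P.length).foldl
        (fun acc j => acc ++ [G i (acc.getD j [])]) ps) (P ++ X)
      = P ++ X ++ is.flatMap (fun i => P.map (G i)) := by
  intro is
  induction is with
  | nil => simp
  | cons i is ih =>
    intro X
    simp only [List.foldl_cons]
    rw [jloop (G i) P.length (P ++ X) (by simp), List.take_left]
    have : P ++ X ++ P.map (G i) = P ++ (X ++ P.map (G i)) := by simp
    rw [this, ih]
    simp [List.flatMap_cons]

lemma stepA_eq (P : List (List Int)) (tie : List Int) (htie : tie ≠ []) :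
    stepA (P, P.length) tie
      = ((List.range (permsA tie).length).flatMap (fun i => P.map (appC tie i)),
         ((List.range (permsA tie).length).flatMap (fun i => P.map (appC tie i))).length) := by
  have hlen : 0 < (permsA tie).length := List.length_pos_iff.mpr (permsA_ne_nil tie htie)
  unfold stepA
  have hP : P = P ++ ([] : List (List Int)) := by simp
  have hbody := iloop P
      (fun i base => (List.range tie.length).foldl
        (fun row t => pySetItem row (tie.getD 0 0 + Int.ofNat t)
          (((permsA tie).getD i []).getD t 0)) base)
      (List.range' 1 ((permsA tie).length - 1)) []
  simp only [List.append_nil] at hbody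
  simp only [hbody]
  have hsplit : List.range (permsA tie).length = 0 :: List.range' 1 ((permsA tie).length - 1) := by
    rw [List.range_eq_range']
    obtain ⟨m, hm⟩ : ∃ m, (permsA tie).length = m + 1 := ⟨(permsA tie).length - 1, by omega⟩
    rw [hm]
    simp [List.range'_succ]
  rw [hsplit]
  simp only [List.flatMap_cons]
  have h0 : P.map (appC tie 0) = P := by
    rw [show appC tie 0 = id from funext fun r => by simp [appC]]
    exact List.map_id _
  have h1 : (List.range' 1 ((permsA tie).length - 1)).flatMap (fun i => P.map (appC tie i))
      = (List.range' 1 ((permsA tie).length - 1)).flatMap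
          (fun i => P.map (fun base => (List.range tie.length).foldl
            (fun row t => pySetItem row (tie.getD 0 0 + Int.ofNat t)
              (((permsA tie).getD i []).getD t 0)) base)) := by
    apply flatMap_congr'
    intro i hi
    have hi1 : 1 ≤ i := by
      have := List.mem_range'_1.mp hi
      omega
    apply List.map_congr_left
    intro p _
    rw [appC, if_neg (by omega)]
  rw [h0, h1]

-- characterization of A's main fold
lemma mainA : ∀ (ties : List (List Int)) (P : List (List Int)),
    (∀ tie ∈ ties, tie ≠ []) →
    (ties.foldl stepA (P, P.length)).1
      = (combosLr (ties.map (fun tie => (permsA tie).length))).flatMap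
          (fun c => P.map (fun p => appCombo ties c p)) := by
  intro ties
  induction ties with
  | nil => intro P _; simp [combosLr, appCombo]
  | cons tie ts ih =>
    intro P h
    have htie : tie ≠ [] := h tie (by simp)
    rw [List.foldl_cons, stepA_eq P tie htie,
      ih _ (fun t ht => h t (by simp [ht]))]
    simp only [List.map_cons, combosLr, List.map_flatMap, List.map_map,
      List.flatMap_assoc, List.flatMap_map]
    apply flatMap_congr'
    intro c _
    apply flatMap_congr'
    intro i _
    apply List.map_congr_left
    intro p _
    simp [Function.comp, appCombo_cons]

-- B's combos fold
lemma prod_foldl (rs : List Nat) : ∀ cs : List (List Nat),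
    rs.foldl (fun cs r => cs.flatMap (fun c => (List.range r).map (fun i => c ++ [i]))) cs
      = cs.flatMap (fun c => (prodR rs).map (fun d => c ++ d)) := by
  induction rs with
  | nil => intro cs; simp [prodR]
  | cons r rs ih =>
    intro cs
    rw [List.foldl_cons, ih]
    simp only [prodR, List.flatMap_assoc, List.flatMap_map, List.map_flatMap, List.map_map]
    apply flatMap_congr'
    intro c _
    apply flatMap_congr'
    intro i _
    apply List.map_congr_left
    intro d _
    simp

lemma prodR_append : ∀ (l1 l2 : List Nat),
    prodR (l1 ++ l2) = (prodR l1).flatMap (fun d1 => (prodR l2).map (fun d2 => d1 ++ d2)) := by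
  intro l1
  induction l1 with
  | nil => intro l2; simp [prodR]
  | cons r l1 ih =>
    intro l2
    simp only [List.cons_append, prodR, ih, List.flatMap_assoc, List.flatMap_map,
      List.map_flatMap, List.map_map]
    apply flatMap_congr'
    intro i _
    apply flatMap_congr'
    intro d1 _
    apply List.map_congr_left
    intro d2 _
    simp

lemma prodR_reverse (rs : List Nat) : (prodR rs.reverse).map List.reverse = combosLr rs := by
  induction rs with
  | nil => simp [prodR, combosLr]
  | cons r rs ih =>
    have hr : prodR [r] = (List.range r).map (fun i => [i]) := by
      simp only [prodR, List.map_cons, List.map_nil]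
      exact flatMap_single _ _
    rw [List.reverse_cons, prodR_append, hr]
    simp only [combosLr, ← ih, List.map_flatMap, List.map_map, List.flatMap_map]
    apply flatMap_congr'
    intro d _
    apply List.map_congr_left
    intro i _
    simp

-- elements of combosLr over (ties.map f) are pointwise in range
lemma combosLr_zip_lt : ∀ (ties : List (List Int)) (f : List Int → Nat) (c : List Nat),
    c ∈ combosLr (ties.map f) → ∀ p ∈ ties.zip c, p.2 < f p.1 := by
  intro ties
  induction ties with
  | nil => intro f c _ p hp; simp at hp
  | cons tie ts ih =>
    intro f c hc p hp
    simp only [List.map_cons, combosLr, List.mem_flatMap, List.mem_map] at hc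
    obtain ⟨c', hc', i, hi, hceq⟩ := hc
    subst hceq
    rcases List.mem_cons.mp hp with hp1 | hp2
    · subst hp1; exact List.mem_range.mp hi
    · exact ih f c' hc' p hp2

-- B's per-row reconstruction equals the semantic appCombo
lemma rowB_eq (ties : List (List Int)) (hne : ∀ tie ∈ ties, tie ≠ []) (base : List Int)
    (c : List Nat) (hc : c ∈ combosLr (ties.map (fun tie => (permsA tie).length))) :
    ((ties.map (fun tie => (tie.getD 0 0, permsB tie))).zip c).foldl
      (fun row oc => if oc.2 = 0 then row
        else (PySem.List.enumerate (oc.1.2.getD oc.2 [])).foldl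
          (fun r tv => pySetItem r (oc.1.1 + tv.1) tv.2) row) base
      = appCombo ties c base := by
  rw [List.zip_map_left, List.foldl_map]
  unfold appCombo
  apply PySem.List.foldl_congr_mem
  intro row p hp
  simp only [Prod.map_fst, Prod.map_snd, id]
  have hpt : p.1 ∈ ties := (List.of_mem_zip hp).1
  have hptne : p.1 ≠ [] := hne p.1 hpt
  have hlt : p.2 < (permsA p.1).length :=
    combosLr_zip_lt ties (fun tie => (permsA tie).length) c hc p hp
  by_cases h0 : p.2 = 0
  · simp [h0, appC]
  · rw [if_neg h0, appC, if_neg h0, ← permsA_eq_permsB p.1 hptne]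
    have hvlen : ((permsA p.1).getD p.2 []).length = p.1.length := by
      rw [List.getD_eq_getElem _ _ hlt]
      exact permsA_len_mem p.1 hptne _ (List.getElem_mem hlt)
    rw [PySem.List.enumerate_eq_map_pyRange ((permsA p.1).getD p.2 []) 0, List.foldl_map]
    simp only [PySem.List.len_eq]
    rw [PySem.List.pyRange_zero_natCast, List.foldl_map]
    simp only [PySem.List.pyGetD_natCast]
    rw [hvlen]
    rfl

-- characterization of B
lemma mainB (ties : List (List Int)) (n : Int) (h : ∀ tie ∈ ties, tie ≠ []) :
    tie_break_permutations_alt ties n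
      = (combosLr (ties.map (fun tie => (permsA tie).length))).map
          (fun c => appCombo ties c (PySem.List.pyRange 0 n 1)) := by
  have hcnt : ties.map (fun tie => (permsB tie).length)
      = ties.map (fun tie => (permsA tie).length) :=
    List.map_congr_left (fun t ht => by rw [permsA_eq_permsB t (h t ht)])
  have hopt : ∀ cs : List (List Nat),
      ((ties.map (fun tie => (tie.getD 0 0, permsB tie))).reverse.foldl
        (fun cs o => cs.flatMap (fun c => (List.range o.2.length).map (fun i => c ++ [i]))) cs)
      = cs.flatMap (fun c =>
          (prodR ((ties.map (fun tie => (permsB tie).length)).reverse)).map (fun d => c ++ d)) := by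
    intro cs
    rw [← List.map_reverse, List.foldl_map, ← prod_foldl, ← List.map_reverse, List.foldl_map]
  simp only [tie_break_permutations_alt]
  rw [hopt [[]]]
  have hflat : ([([] : List Nat)].flatMap (fun c =>
      (prodR ((ties.map (fun tie => (permsB tie).length)).reverse)).map (fun d => c ++ d)))
      = prodR ((ties.map (fun tie => (permsB tie).length)).reverse) := by
    simp
  rw [hflat]
  rw [show (fun combo : List Nat =>
      ((ties.map (fun tie => (tie.getD 0 0, permsB tie))).zip combo.reverse).foldl
        (fun row oc => if oc.2 = 0 then row
          else (PySem.List.enumerate (oc.1.2.getD oc.2 [])).foldl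
            (fun r tv => pySetItem r (oc.1.1 + tv.1) tv.2) row)
        (PySem.List.pyRange 0 n 1))
    = (fun c : List Nat =>
      ((ties.map (fun tie => (tie.getD 0 0, permsB tie))).zip c).foldl
        (fun row oc => if oc.2 = 0 then row
          else (PySem.List.enumerate (oc.1.2.getD oc.2 [])).foldl
            (fun r tv => pySetItem r (oc.1.1 + tv.1) tv.2) row)
        (PySem.List.pyRange 0 n 1)) ∘ List.reverse from rfl]
  rw [← List.map_map, prodR_reverse, hcnt]
  apply List.map_congr_left
  intro c hc
  exact rowB_eq ties h (PySem.List.pyRange 0 n 1) c hc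

-- ===== VERDICT (by name: the statement is the Claim_ definition above) =====
theorem tie_break_permutations_spec : Claim_equal_tie_break_permutations := by
  intro ties n _hdom hpre
  unfold Spec_tie_break_permutations
  have hne : ∀ tie ∈ ties, tie ≠ [] := fun t ht => (hpre t ht).1
  rw [portA_eq, mainA ties [PySem.List.pyRange 0 n 1] hne, mainB ties n hne]
  simp only [List.map_cons, List.map_nil]
  exact flatMap_single _ _
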